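-- pv_equiv track=rewrite | github.com/budkee/estudos | Linguagens/Python/2023/P3/corrigido/totalDeVendas.py | calcular_vendas_totais
-- ===== SOURCE A (Python) =====
-- def calcular_vendas_totais(vendas, precos):
--     # Inicializar listas de total de vendas por vendedor e total de vendas
--     vendas_totais_vendedor = [0] * len(vendas)
--     total_vendas = 0
--
--     # Calcular o total de vendas por vendedor e o total de vendas da revenda
--     for vendedor in range(len(vendas)):
--         for modelo in range(len(vendas[vendedor])):
--             quantidade = vendas[vendedor][modelo]
--             preco = precos[modelo]
--             vendas_totais_vendedor[vendedor] += quantidade * preco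
--             total_vendas += quantidade * preco
--
--     return vendas_totais_vendedor, total_vendas
-- ===== SOURCE B (Python) =====
-- def calcular_vendas_totais(vendas, precos):
--     # column-major: walk each model (price) once, scattering its contribution to every seller;
--     # columns beyond the longest row contribute nothing, so the sweep stops there
--     vendas_totais_vendedor = [0] * len(vendas)
--     limite = min(len(precos), max(map(len, vendas), default=0))
--     for modelo in range(limite):
--         preco = precos[modelo]
--         for vendedor, linha in enumerate(vendas):
--             if modelo < len(linha):
--                 vendas_totais_vendedor[vendedor] += linha[modelo] * preco
--     return vendas_totais_vendedor, sum(vendas_totais_vendedor)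
-- ===== Notes on version B (the rewrite author's own statement) =====
-- stated objective: alternative
-- what changed: Transposes the traversal: instead of A's row-major nested loop over each seller's models with a co-accumulated grand total, B sweeps price columns (capped at the longest row), scattering each model's contribution across all sellers guarded by row length, and computes the grand total afterwards as sum of the subtotals.
import Mathlib
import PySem

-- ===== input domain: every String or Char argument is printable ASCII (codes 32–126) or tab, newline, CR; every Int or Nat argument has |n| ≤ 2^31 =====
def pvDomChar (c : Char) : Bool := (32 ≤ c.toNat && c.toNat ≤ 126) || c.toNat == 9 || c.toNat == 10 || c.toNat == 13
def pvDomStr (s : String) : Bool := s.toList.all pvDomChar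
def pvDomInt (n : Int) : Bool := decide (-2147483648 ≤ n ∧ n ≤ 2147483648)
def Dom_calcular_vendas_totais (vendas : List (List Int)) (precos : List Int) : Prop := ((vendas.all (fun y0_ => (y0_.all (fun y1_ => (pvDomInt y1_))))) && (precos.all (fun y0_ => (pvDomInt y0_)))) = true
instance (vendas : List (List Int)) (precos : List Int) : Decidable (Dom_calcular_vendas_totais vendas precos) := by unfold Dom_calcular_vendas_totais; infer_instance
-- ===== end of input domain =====

-- B transposes the traversal: column-major over the price list, scattering each model's
-- contribution to all sellers (guarded by row length), with the grand total as a final sum —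
-- instead of A's row-major fused nested loop (objective: alternative).


-- ===== PORT A =====
-- literal transliteration of A: a zero-initialised list plus a total, nested index loops
-- mutating both accumulators.  Indexing is via pyGetD (the total form of xs[i]); every index
-- taken is in range on inputs admitted by Pre_, so the defaults are never read there.
def calcular_vendas_totais (vendas : List (List Int)) (precos : List Int) : List Int × Int :=
  (PySem.List.pyRange 0 vendas.length 1).foldl
    (fun (st : List Int × Int) vendedor =>
      let linha := PySem.List.pyGetD vendas vendedor []
      (PySem.List.pyRange 0 linha.length 1).foldl
        (fun (st : List Int × Int) modelo =>
          (st.1.set vendedor.toNat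
             (st.1.getD vendedor.toNat 0 + PySem.List.pyGetD linha modelo 0 * PySem.List.pyGetD precos modelo 0),
           st.2 + PySem.List.pyGetD linha modelo 0 * PySem.List.pyGetD precos modelo 0)) st)
    (List.replicate vendas.length 0, 0)

-- ===== PORT B =====
-- Source B: column-major sweep 'for modelo in range(limite)' (limite = min(len(precos), longest row))
-- with inner loop 'for vendedor, linha in enumerate(vendas)' guarded by 'modelo < len(linha)';
-- grand total as a final sum over the subtotal list.
def calcular_vendas_totais_alt (vendas : List (List Int)) (precos : List Int) : List Int × Int :=
  let limite := Nat.min precos.length ((vendas.map List.length).foldl Nat.max 0)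
  let totals := (PySem.List.pyRange 0 (limite : Int) 1).foldl
    (fun (totals : List Int) modelo =>
      (PySem.List.enumerate vendas 0).foldl
        (fun (totals : List Int) q =>
          if modelo < (q.2.length : Int) then
            totals.set q.1.toNat (totals.getD q.1.toNat 0
              + PySem.List.pyGetD q.2 modelo 0 * PySem.List.pyGetD precos modelo 0)
          else totals) totals)
    (List.replicate vendas.length 0)
  (totals, totals.sum)

-- ===== PRECONDITION & SPEC =====
-- Pre_ excludes exactly the inputs on which A raises IndexError: a row longer than precos makes
-- precos[modelo] fail (B's column-major loop never reads beyond precos, so it returns there).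
def Pre_calcular_vendas_totais (vendas : List (List Int)) (precos : List Int) : Prop :=
  ∀ linha ∈ vendas, linha.length ≤ precos.length
instance (vendas : List (List Int)) (precos : List Int) : Decidable (Pre_calcular_vendas_totais vendas precos) := by unfold Pre_calcular_vendas_totais; infer_instance

def pvWitness_calcular_vendas_totais : List (List Int) × List Int := ([[1, 2], [3]], [10, 5])

def Spec_calcular_vendas_totais (vendas : List (List Int)) (precos : List Int) (out : List Int × Int) : Prop := out = calcular_vendas_totais_alt vendas precos
instance (vendas : List (List Int)) (precos : List Int) (out : List Int × Int) : Decidable (Spec_calcular_vendas_totais vendas precos out) := by unfold Spec_calcular_vendas_totais; infer_instance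

-- ===== CLAIM (what is proved, stated in full; the proofs are below) =====
def Claim_equal_calcular_vendas_totais : Prop := ∀ (vendas : List (List Int)) (precos : List Int), Dom_calcular_vendas_totais vendas precos → Pre_calcular_vendas_totais vendas precos → Spec_calcular_vendas_totais vendas precos (calcular_vendas_totais vendas precos)

-- ===== LEMMAS AND PROOFS =====

-- Proof-side reference: one row's weighted sum (what both programs compute per seller).
def pvSubtotal (linha : List Int) (precos : List Int) : Int :=
  (PySem.List.pyRange 0 linha.length 1).foldl
    (fun s modelo => s + PySem.List.pyGetD linha modelo 0 * PySem.List.pyGetD precos modelo 0) 0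

-- ---- A-side: the fused nested loop produces (map pvSubtotal, sum) ----

-- A's inner loop over any index list L adds the loop's own sum at index v and to the total.
lemma inner_fold_eq (L : List Int) (f : Int → Int) :
    ∀ (l : List Int) (t : Int) (v : Nat), v < l.length →
    L.foldl (fun (st : List Int × Int) m =>
        (st.1.set v (st.1.getD v 0 + f m), st.2 + f m)) (l, t)
      = (l.set v (l.getD v 0 + (L.map f).sum), t + (L.map f).sum) := by
  induction L with
  | nil =>
    intro l t v hv
    simp only [List.foldl_nil, List.map_nil, List.sum_nil, add_zero, List.getD]
    rw [List.getElem?_eq_getElem hv]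
    simp
  | cons x L ih =>
    intro l t v hv
    simp only [List.foldl_cons]
    rw [ih (l.set v (l.getD v 0 + f x)) (t + f x) v (by simpa using hv)]
    have hA : (l.set v (l.getD v 0 + f x)).getD v 0 = l.getD v 0 + f x := by
      simp [List.getD, hv]
    rw [hA, List.set_set]
    simp [add_assoc]

-- A's outer loop over the enumerated rows, generalized over the start index.
lemma outer_fold_eq (precos : List Int) :
    ∀ (rows : List (List Int)) (s : Nat) (l : List Int) (t : Int),
    l.length = s + rows.length →
    (∀ k, s ≤ k → l.getD k 0 = 0) →
    (PySem.List.enumerate rows (s : Int)).foldl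
      (fun (st : List Int × Int) p =>
        (PySem.List.pyRange 0 p.2.length 1).foldl
          (fun (st : List Int × Int) modelo =>
            (st.1.set p.1.toNat
               (st.1.getD p.1.toNat 0 + PySem.List.pyGetD p.2 modelo 0 * PySem.List.pyGetD precos modelo 0),
             st.2 + PySem.List.pyGetD p.2 modelo 0 * PySem.List.pyGetD precos modelo 0)) st)
      (l, t)
    = (l.take s ++ rows.map (fun linha => pvSubtotal linha precos),
       t + (rows.map (fun linha => pvSubtotal linha precos)).sum) := by
  intro rows
  induction rows with
  | nil =>
    intro s l t hl _
    simp only [List.length_nil, Nat.add_zero] at hl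
    simp [PySem.List.enumerate_nil, List.take_of_length_le (Nat.le_of_eq hl)]
  | cons r rows ih =>
    intro s l t hl hz
    have hv : s < l.length := by simp only [List.length_cons] at hl; omega
    rw [PySem.List.enumerate_cons, List.foldl_cons]
    simp only [Int.toNat_natCast]
    rw [inner_fold_eq (PySem.List.pyRange 0 r.length 1)
        (fun m => PySem.List.pyGetD r m 0 * PySem.List.pyGetD precos m 0) l t s hv,
        hz s (Nat.le_refl s), zero_add]
    have hcast : ((s : Int) + 1) = (((s+1 : Nat)) : Int) := by push_cast; ring
    rw [hcast, ih (s+1) _ _ (by simp only [List.length_cons] at hl ⊢; simp [hl]; omega)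
        (by
          intro k hk
          have hne : s ≠ k := by omega
          rw [List.getD, List.getElem?_set_ne hne]
          exact hz k (by omega))]
    have hS : pvSubtotal r precos =
        ((PySem.List.pyRange 0 r.length 1).map
          (fun m => PySem.List.pyGetD r m 0 * PySem.List.pyGetD precos m 0)).sum := by
      rw [pvSubtotal, PySem.List.foldl_add]
      exact zero_add _
    have htake : (l.set s (((PySem.List.pyRange 0 r.length 1).map
          (fun m => PySem.List.pyGetD r m 0 * PySem.List.pyGetD precos m 0)).sum)).take (s+1)
        = l.take s ++ [((PySem.List.pyRange 0 r.length 1).map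
          (fun m => PySem.List.pyGetD r m 0 * PySem.List.pyGetD precos m 0)).sum] := by
      rw [List.set_eq_take_append_cons_drop, if_pos hv]
      simp [List.take_append, Nat.le_of_lt hv]
    simp [htake, hS, add_assoc]

-- ---- B-side: the column-major fold produces the same subtotal list ----

-- contribution of price column (j, preco) to row r
def pvContrib (j preco : Int) (r : List Int) : Int :=
  if j < (r.length : Int) then PySem.List.pyGetD r j 0 * preco else 0

-- B's inner loop: one price column scattered across the enumerated rows.
lemma innerB (j preco : Int) :
    ∀ (rows : List (List Int)) (s : Nat) (l : List Int), l.length = s + rows.length →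
    (PySem.List.enumerate rows (s : Int)).foldl
      (fun (l : List Int) q =>
        if j < (q.2.length : Int) then
          l.set q.1.toNat (l.getD q.1.toNat 0 + PySem.List.pyGetD q.2 j 0 * preco)
        else l) l
    = l.take s ++ List.zipWith (fun old r => old + pvContrib j preco r) (l.drop s) rows := by
  intro rows
  induction rows with
  | nil =>
    intro s l hl
    simp only [List.length_nil, Nat.add_zero] at hl
    simp [PySem.List.enumerate_nil, List.take_of_length_le (Nat.le_of_eq hl),
      List.drop_eq_nil_of_le (Nat.le_of_eq hl)]
  | cons r rows ih =>
    intro s l hl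
    have hv : s < l.length := by simp only [List.length_cons] at hl; omega
    rw [PySem.List.enumerate_cons, List.foldl_cons]
    simp only [Int.toNat_natCast]
    have hdrop : l.drop s = l[s] :: l.drop (s+1) := List.drop_eq_getElem_cons hv
    have hcast : ((s : Int) + 1) = (((s+1 : Nat)) : Int) := by push_cast; ring
    have hgd : l.getD s 0 = l[s] := by simp [List.getD, List.getElem?_eq_getElem hv]
    by_cases hj : j < (r.length : Int)
    · rw [if_pos hj]
      set nv := l.getD s 0 + PySem.List.pyGetD r j 0 * preco with hnv
      rw [hcast, ih (s+1) (l.set s nv) (by simp only [List.length_cons] at hl; simp; omega)]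
      have htake : (l.set s nv).take (s+1) = l.take s ++ [nv] := by
        rw [List.set_eq_take_append_cons_drop, if_pos hv]
        simp [List.take_append, Nat.le_of_lt hv]
      have hdrop' : (l.set s nv).drop (s+1) = l.drop (s+1) :=
        List.drop_set_of_lt (by omega)
      rw [htake, hdrop', hdrop, List.zipWith_cons_cons, List.append_assoc,
        List.singleton_append]
      simp only [pvContrib, if_pos hj, hnv, hgd]
    · rw [if_neg hj]
      rw [hcast, ih (s+1) l (by simp only [List.length_cons] at hl; omega)]
      have htake : l.take (s+1) = l.take s ++ [l[s]] := by
        rw [List.take_add_one, List.getElem?_eq_getElem hv]; rfl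
      rw [htake, hdrop, List.zipWith_cons_cons, List.append_assoc, List.singleton_append]
      simp only [pvContrib, if_neg hj, add_zero]

lemma zipWith_left_of_length_eq :
    ∀ (t : List Int) (v : List (List Int)), t.length = v.length →
    List.zipWith (fun (a : Int) (_ : List Int) => a) t v = t := by
  intro t
  induction t with
  | nil => intro v _; simp
  | cons a t ih => intro v hv; cases v with
    | nil => simp at hv
    | cons r v => simpa using ih v (by simpa using hv)

lemma zipWith_zipWith_same {α β : Type} (f g : α → β → α) :
    ∀ (t : List α) (v : List β),
    List.zipWith g (List.zipWith f t v) v = List.zipWith (fun a b => g (f a b) b) t v := by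
  intro t
  induction t with
  | nil => intro v; simp
  | cons a t ih => intro v; cases v with
    | nil => simp
    | cons b v => simp [ih]

-- B's outer loop over any list of column indices, looking each price up inside.
lemma outerB (vendas : List (List Int)) (precos : List Int) :
    ∀ (cols : List Int) (t : List Int), t.length = vendas.length →
    cols.foldl
      (fun (t : List Int) modelo =>
        (PySem.List.enumerate vendas 0).foldl
          (fun (t : List Int) q =>
            if modelo < (q.2.length : Int) then
              t.set q.1.toNat (t.getD q.1.toNat 0
                + PySem.List.pyGetD q.2 modelo 0 * PySem.List.pyGetD precos modelo 0)
            else t) t) t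
    = List.zipWith (fun old r =>
        old + (cols.map (fun j => pvContrib j (PySem.List.pyGetD precos j 0) r)).sum) t vendas := by
  intro cols
  induction cols with
  | nil =>
    intro t ht
    simp only [List.foldl_nil, List.map_nil, List.sum_nil, add_zero]
    exact (zipWith_left_of_length_eq t vendas ht).symm
  | cons j cols ih =>
    intro t ht
    rw [List.foldl_cons]
    have h0 := innerB j (PySem.List.pyGetD precos j 0) vendas 0 t (by simpa using ht)
    simp only [Nat.cast_zero, List.take_zero, List.drop_zero, List.nil_append] at h0
    rw [h0, ih _ (by rw [List.length_zipWith]; omega), zipWith_zipWith_same]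
    have hfun : (fun (a : Int) (b : List Int) =>
        a + pvContrib j (PySem.List.pyGetD precos j 0) b
          + (List.map (fun k => pvContrib k (PySem.List.pyGetD precos k 0) b) cols).sum)
        = fun (a : Int) (b : List Int) =>
            a + (List.map (fun k => pvContrib k (PySem.List.pyGetD precos k 0) b) (j :: cols)).sum := by
      funext a b
      simp [add_assoc]
    rw [hfun]

-- initial state: zipWith over a zero list is a map
lemma zipWith_replicate_zero (f : Int → List Int → Int) :
    ∀ (v : List (List Int)),
    List.zipWith f (List.replicate v.length 0) v = v.map (f 0) := by
  intro v
  induction v with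
  | nil => simp
  | cons r v ih => simp [List.replicate_succ, ih]

-- a row's total contribution over any column range covering it is its weighted subtotal
lemma colsum_eq_subtotal (precos r : List Int) (L : Nat) (h : r.length ≤ L) :
    ((PySem.List.pyRange 0 (L : Int) 1).map
        (fun j => pvContrib j (PySem.List.pyGetD precos j 0) r)).sum
      = pvSubtotal r precos := by
  have hsplit := PySem.List.pyRange_one_append 0 (r.length : Int) (L : Int)
    (by positivity) (by exact_mod_cast h)
  rw [hsplit, List.map_append, List.sum_append]
  have h2 : ((PySem.List.pyRange (r.length : Int) (L : Int) 1).map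
      (fun j => pvContrib j (PySem.List.pyGetD precos j 0) r)).sum = 0 := by
    rw [List.sum_eq_zero]
    intro x hx
    simp only [List.mem_map] at hx
    obtain ⟨j, hj, rfl⟩ := hx
    have := (PySem.List.mem_pyRange_one).mp hj
    simp [pvContrib]
    omega
  rw [h2, add_zero]
  have h1 : (PySem.List.pyRange 0 (r.length : Int) 1).map
      (fun j => pvContrib j (PySem.List.pyGetD precos j 0) r)
      = (PySem.List.pyRange 0 (r.length : Int) 1).map
        (fun j => PySem.List.pyGetD r j 0 * PySem.List.pyGetD precos j 0) := by
    apply List.map_congr_left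
    intro j hj
    have := (PySem.List.mem_pyRange_one).mp hj
    simp [pvContrib, this.2]
  rw [h1, pvSubtotal, PySem.List.foldl_add]
  simp

lemma calcular_alt_eq (vendas : List (List Int)) (precos : List Int)
    (hpre : Pre_calcular_vendas_totais vendas precos) :
    calcular_vendas_totais_alt vendas precos
      = (vendas.map (fun linha => pvSubtotal linha precos),
         (vendas.map (fun linha => pvSubtotal linha precos)).sum) := by
  unfold calcular_vendas_totais_alt
  dsimp only
  rw [outerB vendas precos (PySem.List.pyRange 0
      ((Nat.min precos.length ((vendas.map List.length).foldl Nat.max 0) : Nat) : Int) 1)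
      _ (by simp)]
  rw [zipWith_replicate_zero]
  have hmap : vendas.map
      (fun r => 0 + ((PySem.List.pyRange 0
          ((Nat.min precos.length ((vendas.map List.length).foldl Nat.max 0) : Nat) : Int) 1).map
          (fun j => pvContrib j (PySem.List.pyGetD precos j 0) r)).sum)
      = vendas.map (fun linha => pvSubtotal linha precos) := by
    apply List.map_congr_left
    intro r hr
    have hmax : r.length ≤ (vendas.map List.length).foldl Nat.max 0 :=
      (PySem.List.le_foldl_max (vendas.map List.length) 0).2 r.length
        (List.mem_map_of_mem hr)
    rw [zero_add, colsum_eq_subtotal precos r _ (Nat.le_min.mpr ⟨hpre r hr, hmax⟩)]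
  rw [hmap]

-- ===== VERDICT (by name: the statement is the Claim_ definition above) =====
theorem calcular_vendas_totais_spec : Claim_equal_calcular_vendas_totais := by
  unfold Claim_equal_calcular_vendas_totais
  intro vendas precos _ hpre
  show calcular_vendas_totais vendas precos = calcular_vendas_totais_alt vendas precos
  have h := outer_fold_eq precos vendas 0 (List.replicate vendas.length 0) 0
    (by simp)
    (by intro k _; simp [List.getD, List.getElem?_replicate]; split <;> simp)
  simp only [Nat.cast_zero] at h
  rw [PySem.List.enumerate_eq_map_pyRange (d := ([] : List Int))] at h
  rw [List.foldl_map] at h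
  rw [calcular_alt_eq vendas precos hpre]
  simpa [calcular_vendas_totais] using h
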